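-- pv_equiv track=rewrite | github.com/jfpazto/Cnyt-1 | proyecto.py | multiplicacionVec
-- ===== SOURCE A (Python) =====
-- def sumaVec(el1,el2):
--     resul = [0,0]
--     resul[0] = el1[0] + el2[0]
--     resul[1] = el1[1] + el2[1]
--     return (resul[0],resul[1])
--
-- def realiza_multiplicacion(vec1,vec2):
--     '''recibe dos matrices y realiza la multiplicacion'''
--     lista = [0,0,0,0]
--     res = [0,0]
--     con = 0
--     for i in vec1:
--         for j in vec2:
--             lista[con] = i*j
--             con += 1
--     res[0] = lista[0] + (-1*lista[3])
--     res[1] = lista[1] + lista[2]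
--     return (res[0],res[1])
--
-- def multiplicacionVec(vec1,vec2):
--     '''recibe dos vectores y realiza su multiplicacion'''
--     ini = (0,0)
--     longitud=len(vec1)
--     con=0
--     while con!=longitud:
--         suma = realiza_multiplicacion(vec1[con],vec2[con])
--         ini = sumaVec(ini,suma)
--         con+=1
--
--     return ini
-- ===== SOURCE B (Python) =====
-- def multiplicacionVec(vec1, vec2):
--     '''recibe dos vectores y realiza su multiplicacion'''
--     n = len(vec1)
--     ac = sum(vec1[i][0] * vec2[i][0] for i in range(n))
--     bd = sum(vec1[i][1] * vec2[i][1] for i in range(n))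
--     cross = sum((vec1[i][0] + vec1[i][1]) * (vec2[i][0] + vec2[i][1]) for i in range(n))
--     return (ac - bd, cross - ac - bd)
-- ===== Notes on version B (the rewrite author's own statement) =====
-- stated objective: alternative
-- what changed: Replaces A's per-element 4-product nested loop plus vector-add helper and while/counter accumulation by the Gauss/Karatsuba 3-multiplication identity computed in three separate summation passes (sum a*c, sum b*d, sum (a+b)*(c+d)), combined at the end as (s1-s2, s3-s1-s2).
import Mathlib
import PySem

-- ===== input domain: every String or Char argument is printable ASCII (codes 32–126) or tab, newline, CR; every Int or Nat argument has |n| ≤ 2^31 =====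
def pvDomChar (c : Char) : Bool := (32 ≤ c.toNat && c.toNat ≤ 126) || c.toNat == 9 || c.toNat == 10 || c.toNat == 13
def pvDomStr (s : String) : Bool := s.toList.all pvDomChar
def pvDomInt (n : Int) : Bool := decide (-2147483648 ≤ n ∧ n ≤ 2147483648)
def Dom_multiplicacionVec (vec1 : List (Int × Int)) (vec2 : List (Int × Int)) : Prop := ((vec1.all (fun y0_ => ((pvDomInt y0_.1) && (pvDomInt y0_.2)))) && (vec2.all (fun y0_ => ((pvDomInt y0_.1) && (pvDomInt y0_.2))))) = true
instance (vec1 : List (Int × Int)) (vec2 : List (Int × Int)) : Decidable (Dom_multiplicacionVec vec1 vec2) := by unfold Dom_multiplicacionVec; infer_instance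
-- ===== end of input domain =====

-- B computes the complex dot product by the Gauss/Karatsuba 3-multiplication identity
-- in three separate summation passes, instead of A's per-element 4-product nested loop
-- with helper functions (objective: alternative algorithm, same cost).

-- ===== PORT A =====
def sumaVecA (el1 el2 : Int × Int) : Int × Int :=
  (el1.1 + el2.1, el1.2 + el2.2)

-- nested loop 'for i in vec1: for j in vec2:' over the two components of each pair,
-- appending i*j in order (equivalent to writing lista[con] with con counting from 0)
def realizaMultiplicacionA (v1 v2 : Int × Int) : Int × Int :=
  let lista := [v1.1, v1.2].foldl (fun acc i => [v2.1, v2.2].foldl (fun acc2 j => acc2 ++ [i * j]) acc) []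
  (lista.getD 0 0 + (-1 * lista.getD 3 0), lista.getD 1 0 + lista.getD 2 0)

-- A's 'while con != longitud' loop: con starts at 0 and only increments, so the test
-- is equivalent to con < longitud. vec1[con] is in range; vec2[con] may raise in
-- Python (excluded by Pre_), modelled here by getD's default.
def mvLoopA (vec1 vec2 : List (Int × Int)) (longitud con : Nat) (ini : Int × Int) : Int × Int :=
  if con < longitud then
    let suma := realizaMultiplicacionA (vec1.getD con (0, 0)) (vec2.getD con (0, 0))
    mvLoopA vec1 vec2 longitud (con + 1) (sumaVecA ini suma)
  else ini
termination_by longitud - con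

def multiplicacionVec (vec1 : List (Int × Int)) (vec2 : List (Int × Int)) : Int × Int :=
  mvLoopA vec1 vec2 vec1.length 0 (0, 0)

-- ===== PORT B =====
-- one of B's three 'sum(... for i in range(n))' passes, parameterised by the summand;
-- vec2[i] may raise in Python (excluded by Pre_), modelled by pyGetD's default.
def mvSumB (vec1 vec2 : List (Int × Int)) (f : (Int × Int) → (Int × Int) → Int) : Int :=
  (PySem.List.pyRange 0 (vec1.length : Int) 1).foldl
    (fun s i => s + f (PySem.List.pyGetD vec1 i (0, 0)) (PySem.List.pyGetD vec2 i (0, 0))) 0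

def multiplicacionVec_alt (vec1 : List (Int × Int)) (vec2 : List (Int × Int)) : Int × Int :=
  let ac := mvSumB vec1 vec2 (fun p q => p.1 * q.1)
  let bd := mvSumB vec1 vec2 (fun p q => p.2 * q.2)
  let cross := mvSumB vec1 vec2 (fun p q => (p.1 + p.2) * (q.1 + q.2))
  (ac - bd, cross - ac - bd)

-- ===== PRECONDITION & SPEC =====
-- Pre_ excludes exactly the inputs where Python A raises IndexError (vec2 shorter
-- than vec1); Python B raises there too.
def Pre_multiplicacionVec (vec1 : List (Int × Int)) (vec2 : List (Int × Int)) : Prop :=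
  vec1.length ≤ vec2.length
instance (vec1 : List (Int × Int)) (vec2 : List (Int × Int)) : Decidable (Pre_multiplicacionVec vec1 vec2) := by unfold Pre_multiplicacionVec; infer_instance

def pvWitness_multiplicacionVec : (List (Int × Int)) × (List (Int × Int)) := ([(1, 2), (3, -1)], [(0, 4), (2, 2)])

def Spec_multiplicacionVec (vec1 : List (Int × Int)) (vec2 : List (Int × Int)) (out : Int × Int) : Prop := out = multiplicacionVec_alt vec1 vec2
instance (vec1 : List (Int × Int)) (vec2 : List (Int × Int)) (out : Int × Int) : Decidable (Spec_multiplicacionVec vec1 vec2 out) := by unfold Spec_multiplicacionVec; infer_instance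

-- ===== CLAIM (what is proved, stated in full; the proofs are below) =====
def Claim_equal_multiplicacionVec : Prop := ∀ (vec1 : List (Int × Int)) (vec2 : List (Int × Int)), Dom_multiplicacionVec vec1 vec2 → Pre_multiplicacionVec vec1 vec2 → Spec_multiplicacionVec vec1 vec2 (multiplicacionVec vec1 vec2)

-- ===== LEMMAS AND PROOFS =====

theorem stepA_eq (ini p q : Int × Int) :
    sumaVecA ini (realizaMultiplicacionA p q) =
      (ini.1 + (p.1 * q.1 - p.2 * q.2), ini.2 + (p.1 * q.2 + p.2 * q.1)) := by
  simp [sumaVecA, realizaMultiplicacionA, List.foldl, List.getD]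
  ring_nf

-- A's loop as a single foldl over the index range, with the per-element value inlined
theorem mvLoopA_eq (vec1 vec2 : List (Int × Int)) :
    ∀ (d con : Nat) (ini : Int × Int), vec1.length = con + d →
      mvLoopA vec1 vec2 vec1.length con ini =
        (PySem.List.pyRange (con : Int) (vec1.length : Int) 1).foldl
          (fun acc i =>
            let p := PySem.List.pyGetD vec1 i (0, 0)
            let q := PySem.List.pyGetD vec2 i (0, 0)
            (acc.1 + (p.1 * q.1 - p.2 * q.2), acc.2 + (p.1 * q.2 + p.2 * q.1)))
          ini := by
  intro d
  induction d with
  | zero =>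
      intro con ini h
      rw [mvLoopA, PySem.List.pyRange_one_eq_nil (by omega)]
      simp [h]
  | succ d ih =>
      intro con ini h
      have hlt : con < vec1.length := by omega
      rw [mvLoopA, if_pos hlt]
      conv_rhs => rw [PySem.List.pyRange_one_cons (show (con : Int) < (vec1.length : Int) by exact_mod_cast hlt)]
      rw [List.foldl_cons, ih (con + 1) _ (by omega)]
      simp only [stepA_eq, PySem.List.pyGetD_natCast]
      norm_cast

-- a foldl accumulating a pair componentwise is the pair of mapped sums
theorem pairFold_eq (l : List Int) (f g : Int → Int) :
    ∀ (ini : Int × Int),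
      l.foldl (fun acc i => (acc.1 + f i, acc.2 + g i)) ini =
        (ini.1 + (l.map f).sum, ini.2 + (l.map g).sum) := by
  induction l with
  | nil => intro ini; simp
  | cons x xs ih =>
      intro ini
      simp only [List.foldl_cons, List.map_cons, List.sum_cons, ih]
      simp [add_assoc]

-- the Karatsuba identity, lifted to sums over the same index list
theorem karatsuba_sums (pf qf : Int → Int × Int) (l : List Int) :
    (l.map (fun i => (pf i).1 * (qf i).1 - (pf i).2 * (qf i).2)).sum
      = (l.map (fun i => (pf i).1 * (qf i).1)).sum - (l.map (fun i => (pf i).2 * (qf i).2)).sum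
    ∧ (l.map (fun i => (pf i).1 * (qf i).2 + (pf i).2 * (qf i).1)).sum
      = (l.map (fun i => ((pf i).1 + (pf i).2) * ((qf i).1 + (qf i).2))).sum
        - (l.map (fun i => (pf i).1 * (qf i).1)).sum - (l.map (fun i => (pf i).2 * (qf i).2)).sum := by
  induction l with
  | nil => simp
  | cons x xs ih =>
      obtain ⟨ih1, ih2⟩ := ih
      refine ⟨?_, ?_⟩ <;> simp only [List.map_cons, List.sum_cons, ih1, ih2] <;> ring

-- combining the three passes with the Karatsuba identity equals the inlined pair fold
theorem combineFold (pf qf : Int → Int × Int) (l : List Int) :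
    l.foldl (fun acc i => (acc.1 + ((pf i).1 * (qf i).1 - (pf i).2 * (qf i).2),
                           acc.2 + ((pf i).1 * (qf i).2 + (pf i).2 * (qf i).1))) (0, 0)
      = (l.foldl (fun s i => s + (pf i).1 * (qf i).1) 0 - l.foldl (fun s i => s + (pf i).2 * (qf i).2) 0,
         l.foldl (fun s i => s + ((pf i).1 + (pf i).2) * ((qf i).1 + (qf i).2)) 0
           - l.foldl (fun s i => s + (pf i).1 * (qf i).1) 0 - l.foldl (fun s i => s + (pf i).2 * (qf i).2) 0) := by
  rw [pairFold_eq, PySem.List.foldl_add, PySem.List.foldl_add, PySem.List.foldl_add,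
      (karatsuba_sums pf qf l).1, (karatsuba_sums pf qf l).2]
  simp

-- ===== VERDICT (by name: the statement is the Claim_ definition above) =====
theorem multiplicacionVec_spec : Claim_equal_multiplicacionVec := by
  intro vec1 vec2 _ _
  unfold Spec_multiplicacionVec multiplicacionVec
  simp only [multiplicacionVec_alt, mvSumB]
  rw [mvLoopA_eq vec1 vec2 vec1.length 0 (0, 0) (by omega)]
  simp only [Nat.cast_zero]
  exact combineFold (fun i => PySem.List.pyGetD vec1 i (0, 0))
    (fun i => PySem.List.pyGetD vec2 i (0, 0)) (PySem.List.pyRange 0 (vec1.length : Int) 1)
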